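-- pv_equiv track=rewrite | github.com/johny-b/arc-oocr | functions.py | consecutive_to_zeros
-- ===== SOURCE A (Python) =====
-- def consecutive_to_zeros(lst: list) -> list:
--     if len(lst) <= 1:
--         return lst
--
--     result = []
--     count = 1
--
--     for i in range(1, len(lst)):
--         if lst[i] == lst[i-1]:
--             count += 1
--         else:
--             if count > 1:
--                 result.extend([0] * count)
--             else:
--                 result.append(lst[i-1])
--             count = 1
--
--     if count > 1:
--         result.extend([0] * count)
--     else:
--         result.append(lst[-1])
--
--     return result
-- ===== SOURCE B (Python) =====
-- def consecutive_to_zeros(lst: list) -> list: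
--     if len(lst) <= 1:
--         return lst
--     n = len(lst)
--     return [0 if ((i > 0 and lst[i] == lst[i - 1]) or (i < n - 1 and lst[i] == lst[i + 1]))
--             else lst[i]
--             for i in range(n)]
-- ===== Notes on version B (the rewrite author's own statement) =====
-- stated objective: alternative
-- what changed: Replaces the run-length counter with flush-at-boundary logic by a stateless single pass that classifies each element via comparison with its immediate neighbors.
import Mathlib
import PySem

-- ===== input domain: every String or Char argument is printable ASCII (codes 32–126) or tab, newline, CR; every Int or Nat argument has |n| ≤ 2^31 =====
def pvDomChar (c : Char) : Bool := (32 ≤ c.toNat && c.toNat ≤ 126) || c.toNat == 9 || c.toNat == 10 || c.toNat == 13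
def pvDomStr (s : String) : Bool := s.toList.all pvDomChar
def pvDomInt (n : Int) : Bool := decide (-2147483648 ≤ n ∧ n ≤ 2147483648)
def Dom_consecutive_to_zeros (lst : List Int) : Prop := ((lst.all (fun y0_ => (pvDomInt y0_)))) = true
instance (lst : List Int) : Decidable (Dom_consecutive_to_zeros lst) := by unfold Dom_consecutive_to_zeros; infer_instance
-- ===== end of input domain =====

set_option maxRecDepth 4000


-- B replaces A's run-length counter with flush-at-boundary logic by a stateless
-- neighbor-comparison pass (alternative decomposition, same cost).

-- ===== PORT A =====
-- A's for-loop over i in range(1, len(lst)) compares lst[i] with lst[i-1]; we carry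
-- prev = lst[i-1] and recurse structurally over the tail with the same (result, count) state.
def ctzLoop : Int → List Int → List Int → Int → List Int
  | prev, [], result, count =>
      -- final flush after the loop: lst[-1] = prev here
      if 1 < count then result ++ List.replicate count.toNat 0 else result ++ [prev]
  | prev, cur :: rs, result, count =>
      if cur == prev then ctzLoop cur rs result (count + 1)
      else if 1 < count then ctzLoop cur rs (result ++ List.replicate count.toNat 0) 1
      else ctzLoop cur rs (result ++ [prev]) 1

def consecutive_to_zeros (lst : List Int) : List Int :=
  if lst.length ≤ 1 then lst
  else
    match lst with
    | [] => lst
    | x :: rest => ctzLoop x rest [] 1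

-- ===== PORT B =====
-- Source B's list comprehension over range(n); the guards 0 < i and i < n-1 keep every
-- index in range, so getD's default is never consulted (exact on all inputs).
def consecutive_to_zeros_alt (lst : List Int) : List Int :=
  if lst.length ≤ 1 then lst
  else
    (List.range lst.length).map (fun i =>
      if ((decide (0 < i) && (lst.getD i 0 == lst.getD (i - 1) 0)) ||
          (decide (i < lst.length - 1) && (lst.getD i 0 == lst.getD (i + 1) 0)))
      then 0 else lst.getD i 0)

-- ===== PRECONDITION & SPEC =====
def Spec_consecutive_to_zeros (lst : List Int) (out : List Int) : Prop := out = consecutive_to_zeros_alt lst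
instance (lst : List Int) (out : List Int) : Decidable (Spec_consecutive_to_zeros lst out) := by unfold Spec_consecutive_to_zeros; infer_instance

-- ===== CLAIM (what is proved, stated in full; the proofs are below) =====
def Claim_equal_consecutive_to_zeros : Prop := ∀ (lst : List Int), Dom_consecutive_to_zeros lst → Spec_consecutive_to_zeros lst (consecutive_to_zeros lst)

-- ===== LEMMAS AND PROOFS =====

-- Structural reference: element-wise marking; dup says "the current head equals its predecessor".
def neigh : Bool → Int → List Int → List Int
  | dup, prev, [] => [if dup then 0 else prev]
  | dup, prev, x :: rs => (if (dup || (prev == x)) then 0 else prev) :: neigh (prev == x) x rs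

theorem neigh_length (rest : List Int) : ∀ (dup : Bool) (prev : Int),
    (neigh dup prev rest).length = rest.length + 1 := by
  induction rest with
  | nil => intro dup prev; simp [neigh]
  | cons x rs ih => intro dup prev; simp [neigh, ih]

theorem repl_zero_cons (m : Nat) (L : List Int) :
    List.replicate (m + 1) 0 ++ L = List.replicate m 0 ++ 0 :: L := by
  simp [List.replicate_succ', List.append_assoc]

theorem ctzLoop_eq (rest : List Int) : ∀ (prev : Int) (result : List Int) (count : Int),
    1 ≤ count →
    ctzLoop prev rest result count =
      result ++ (List.replicate (count - 1).toNat 0 ++ neigh (decide (1 < count)) prev rest) := by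
  induction rest with
  | nil =>
    intro prev result count hc
    by_cases h : 1 < count
    · have hn : count.toNat = (count - 1).toNat + 1 := by omega
      rw [show ctzLoop prev [] result count = result ++ List.replicate count.toNat 0 by
        simp [ctzLoop, h], hn, List.replicate_succ']
      simp [neigh, h]
    · have hn : (count - 1).toNat = 0 := by omega
      rw [show ctzLoop prev [] result count = result ++ [prev] by simp [ctzLoop, h], hn]
      simp [neigh, h]
  | cons cur rs ih =>
    intro prev result count hc
    by_cases he : cur = prev
    · have hbe : (cur == prev) = true := by simpa using he
      have hrep : (count + 1 - 1).toNat = (count - 1).toNat + 1 := by omega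
      simp only [ctzLoop, hbe, if_true]
      rw [ih cur result (count + 1) (by omega)]
      subst he
      have hcc : (decide (1 < count + 1)) = true := by simp; omega
      rw [hcc, hrep, repl_zero_cons]
      simp [neigh]
    · have hbe : (cur == prev) = false := by simpa using he
      have hbe' : (prev == cur) = false := by simpa using Ne.symm he
      by_cases h : 1 < count
      · have hn : count.toNat = (count - 1).toNat + 1 := by omega
        simp only [ctzLoop, hbe, Bool.false_eq_true, if_false, h, if_true]
        rw [ih cur (result ++ List.replicate count.toNat 0) 1 (by omega), hn]
        simp [neigh, hbe', List.replicate_succ', List.append_assoc]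
      · have hn : (count - 1).toNat = 0 := by omega
        simp only [ctzLoop, hbe, Bool.false_eq_true, if_false, h, if_false]
        rw [ih cur (result ++ [prev]) 1 (by omega)]
        simp [neigh, hbe', hn, List.append_assoc]

theorem neigh_getElem (rest : List Int) : ∀ (dup : Bool) (prev : Int) (i : Nat)
    (h : i < (neigh dup prev rest).length),
    (neigh dup prev rest)[i] =
      (if (((i == 0) && dup) ||
           (decide (0 < i) && ((prev :: rest).getD i 0 == (prev :: rest).getD (i - 1) 0)) ||
           (decide (i < (prev :: rest).length - 1) && ((prev :: rest).getD i 0 == (prev :: rest).getD (i + 1) 0)))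
       then 0 else (prev :: rest).getD i 0) := by
  induction rest with
  | nil =>
    intro dup prev i h
    simp [neigh] at h
    subst h
    simp [neigh]
  | cons x rs ih =>
    intro dup prev i h
    match i with
    | 0 =>
      simp only [neigh, List.getElem_cons_zero]
      simp
    | (j + 1) =>
      have h' : j < (neigh (prev == x) x rs).length := by
        simpa [neigh] using h
      have := ih (prev == x) x j h'
      simp only [neigh, List.getElem_cons_succ]
      rw [this]
      match j with
      | 0 =>
        simp
        by_cases hpx : prev = x
        · simp [hpx]
        · simp [hpx, Ne.symm hpx]
      | (k + 1) => simp

-- ===== VERDICT (by name: the statement is the Claim_ definition above) =====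
theorem consecutive_to_zeros_spec : Claim_equal_consecutive_to_zeros := by
  intro lst _
  unfold Spec_consecutive_to_zeros consecutive_to_zeros consecutive_to_zeros_alt
  match lst with
  | [] => simp
  | [x] => simp
  | x :: y :: rs =>
    have hlen : ¬ (x :: y :: rs).length ≤ 1 := by simp
    simp only [hlen, if_false]
    rw [ctzLoop_eq (y :: rs) x [] 1 (by norm_num)]
    simp only [show ((1 : Int) - 1).toNat = 0 by norm_num, List.replicate_zero,
      List.nil_append]
    apply List.ext_getElem
    · simp [neigh_length]
    · intro i h1 h2
      rw [neigh_getElem (y :: rs) _ x i]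
      simp only [List.getElem_map, List.getElem_range]
      simp
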